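-- pv_equiv track=rewrite | github.com/mrzrx/AI-mahjong | mahjong_play_two.py | isSan
-- ===== SOURCE A (Python) =====
-- def isSan(lists):
--     flag=[]
--     i=0
--     while i<=len(lists)-3:
--         if lists[i]==lists[i+1] and lists[i+1]==lists[i+2]:
--             flag.append(i)
--             i+=3
--             continue
--         i+=1
--     return   flag
-- ===== SOURCE B (Python) =====
-- def isSan(lists):
--     # run-length decomposition: each maximal run of L equal elements
--     # contributes indices start, start+3, ..., i.e. L//3 triples
--     flag = []
--     n = len(lists)
--     start = 0
--     while start < n:
--         end = start
--         while end < n and lists[end] == lists[start]: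
--             end += 1
--         for k in range((end - start) // 3):
--             flag.append(start + 3 * k)
--         start = end
--     return flag
-- ===== Notes on version B (the rewrite author's own statement) =====
-- stated objective: alternative
-- what changed: B decomposes the list into maximal runs of equal elements and emits start+3k for each run of length L (k < L//3), instead of A's greedy index scan that tests every window of three and skips by 3 on a hit.
import Mathlib
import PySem

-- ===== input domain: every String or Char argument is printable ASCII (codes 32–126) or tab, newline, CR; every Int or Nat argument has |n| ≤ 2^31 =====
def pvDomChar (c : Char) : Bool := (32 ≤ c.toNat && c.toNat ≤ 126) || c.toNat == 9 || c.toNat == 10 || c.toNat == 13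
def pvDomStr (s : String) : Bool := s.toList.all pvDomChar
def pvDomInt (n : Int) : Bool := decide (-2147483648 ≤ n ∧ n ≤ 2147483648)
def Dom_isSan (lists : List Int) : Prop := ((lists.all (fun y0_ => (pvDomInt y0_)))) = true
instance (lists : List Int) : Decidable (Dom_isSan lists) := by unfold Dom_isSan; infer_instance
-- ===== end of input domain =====

-- B is an alternative of the same cost: it splits the list into maximal runs and
-- emits L/3 triple-start indices per run, instead of A's greedy window scan.

-- ===== PORT A =====
-- A's while loop over index i, carried as (remaining suffix, current index i)
def loopA : List Int → Int → List Int
  | a :: b :: c :: rest, i =>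
      if a = b ∧ b = c then i :: loopA rest (i + 3)
      else loopA (b :: c :: rest) (i + 1)
  | _, _ => []
  termination_by l _ => l.length

def isSan (lists : List Int) : List Int := loopA lists 0

-- ===== PORT B =====
-- inner while loop of Source B: length of the maximal run of x at the front of x::t, and the rest
def splitRun (x : Int) : List Int → Nat × List Int
  | [] => (1, [])
  | y :: t => if y = x then ((splitRun x t).1 + 1, (splitRun x t).2) else (1, y :: t)

-- needed for runsLen's termination
theorem splitRun_snd_len (x : Int) (t : List Int) : (splitRun x t).2.length ≤ t.length := by
  induction t with
  | nil => simp [splitRun]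
  | cons y t ih =>
      simp only [splitRun]
      split
      · exact Nat.le_succ_of_le ih
      · simp

-- run lengths of the list, left to right
def runsLen : List Int → List Nat
  | [] => []
  | x :: t => (splitRun x t).1 :: runsLen (splitRun x t).2
  termination_by l => l.length
  decreasing_by simpa using Nat.lt_succ_of_le (splitRun_snd_len x t)

-- the `for k in range((end-start)//3)` appends of Source B
def emit (start : Int) (L : Nat) : List Int := (List.range (L / 3)).map (fun k : Nat => start + 3 * (k : Int))

-- outer while loop of Source B, carrying `start`
def goB (start : Int) : List Nat → List Int
  | [] => []
  | L :: rest => emit start L ++ goB (start + (L : Int)) rest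

def isSan_alt (lists : List Int) : List Int := goB 0 (runsLen lists)

-- ===== PRECONDITION & SPEC =====
def Spec_isSan (lists : List Int) (out : List Int) : Prop := out = isSan_alt lists
instance (lists : List Int) (out : List Int) : Decidable (Spec_isSan lists out) := by unfold Spec_isSan; infer_instance

-- ===== CLAIM (what is proved, stated in full; the proofs are below) =====
def Claim_equal_isSan : Prop := ∀ (lists : List Int), Dom_isSan lists → Spec_isSan lists (isSan lists)

-- ===== LEMMAS AND PROOFS =====

-- shifting a triple-index range by one emitted triple
theorem emit_shift (i : Int) (N : Nat) :
    List.map (fun k : Nat => i + 3 * (k : Int)) (List.range (N + 1))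
      = i :: List.map (fun k : Nat => (i + 3) + 3 * (k : Int)) (List.range N) := by
  induction N generalizing i with
  | zero => simp
  | succ n ih =>
      rw [List.range_succ, List.map_append, ih, List.range_succ, List.map_append]
      simp only [List.map_cons, List.map_nil, List.cons_append]
      have : i + 3 * ((n + 1 : Nat) : Int) = i + 3 + 3 * (n : Int) := by push_cast; ring
      rw [this]

-- splitRun really splits off the maximal run: structure, positivity, and a fresh head
theorem splitRun_struct (x : Int) (t : List Int) :
    1 ≤ (splitRun x t).1 ∧
    x :: t = List.replicate (splitRun x t).1 x ++ (splitRun x t).2 ∧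
    (splitRun x t).2.head? ≠ some x := by
  induction t with
  | nil => simp [splitRun]
  | cons y t ih =>
      simp only [splitRun]
      split
      · rename_i hy
        refine ⟨by omega, ?_, ih.2.2⟩
        subst hy
        rw [List.replicate_succ]
        simpa using ih.2.1
      · rename_i hy
        refine ⟨le_refl _, by simp, ?_⟩
        simpa using hy

-- A's greedy scan, applied to one maximal run followed by a fresh-headed rest
theorem loopA_run (n : Nat) (x : Int) (r : List Int) (hr : r.head? ≠ some x) (i : Int) :
    loopA (List.replicate n x ++ r) i = emit i n ++ loopA r (i + (n : Int)) := by
  match n with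
  | 0 => simp [emit]
  | 1 =>
      match r with
      | [] => simp [loopA, emit]
      | [y] => simp [loopA, emit]
      | y :: z :: r' =>
          have hy : y ≠ x := by simpa using hr
          have hxy : ¬ (x = y) := fun h => hy h.symm
          simp [loopA, emit, hxy]
  | 2 =>
      match r with
      | [] => simp [loopA, emit]
      | y :: r' =>
          have hy : y ≠ x := by simpa using hr
          have hxy : ¬ (x = y) := fun h => hy h.symm
          match r' with
          | [] => simp [loopA, emit, hxy]
          | z :: r'' =>
              have h12 : i + 1 + 1 = i + 2 := by ring
              simp [loopA, emit, hxy, h12]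
  | (m + 3) =>
      have ih := loopA_run m x r hr (i + 3)
      have hrep : List.replicate (m + 3) x ++ r
          = x :: x :: x :: (List.replicate m x ++ r) := by
        simp [List.replicate_succ]
      rw [hrep]
      simp only [loopA]
      rw [if_pos ⟨trivial, trivial⟩]
      rw [ih]
      have hemit : emit i (m + 3) = i :: emit (i + 3) m := by
        have h3 : (m + 3) / 3 = m / 3 + 1 := by omega
        unfold emit
        rw [h3]
        exact emit_shift i (m / 3)
      rw [hemit]
      have : i + 3 + (m : Int) = i + ((m : Nat) + 3 : Nat) := by push_cast; ring
      rw [this]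
      simp
  termination_by n

-- the main invariant: A's loop equals B's run-by-run emission
theorem loopA_eq_goB (l : List Int) (i : Int) : loopA l i = goB i (runsLen l) := by
  match l with
  | [] => simp [loopA, runsLen, goB]
  | x :: t =>
      obtain ⟨h1, h2, h3⟩ := splitRun_struct x t
      have hlen : (splitRun x t).2.length ≤ t.length := splitRun_snd_len x t
      have ih := loopA_eq_goB (splitRun x t).2 (i + ((splitRun x t).1 : Int))
      calc loopA (x :: t) i
          = loopA (List.replicate (splitRun x t).1 x ++ (splitRun x t).2) i := by rw [← h2]
        _ = emit i (splitRun x t).1 ++ loopA (splitRun x t).2 (i + ((splitRun x t).1 : Int)) :=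
            loopA_run _ x _ h3 i
        _ = emit i (splitRun x t).1 ++ goB (i + ((splitRun x t).1 : Int)) (runsLen (splitRun x t).2) := by
            rw [ih]
        _ = goB i (runsLen (x :: t)) := by rw [runsLen]; simp [goB]
  termination_by l.length
  decreasing_by simpa using Nat.lt_succ_of_le hlen

-- ===== VERDICT (by name: the statement is the Claim_ definition above) =====
theorem isSan_spec : Claim_equal_isSan := by
  intro lists _
  unfold Spec_isSan isSan isSan_alt
  exact loopA_eq_goB lists 0
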